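-- pv_equiv track=rewrite | github.com/cb2078/aoc | 20/20.py | f
-- ===== SOURCE A (Python) =====
-- def f(y,a): # i-axis
-- 	if a==0:
-- 		return [x[::-1] for x in y]
-- 	else:
-- 		y=r(y,1)
-- 		y=f(y,0)
-- 		y=r(y,3)
-- 		return y
--
-- def r(y,c): # cw
-- 	for _ in range(c):
-- 		y=[''.join(y[~k][j] for k in range(len(y))) for j in range(len(y))]
-- 	return y
-- ===== SOURCE B (Python) =====
-- def f(y, a):  # i-axis
--     if a == 0:
--         return [x[::-1] for x in y]
--     # vertical flip of the n x n grid: cell (i, j) comes from cell (n-1-i, j)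
--     n = len(y)
--     return [''.join(y[n - 1 - i][j] for j in range(n)) for i in range(n)]
-- ===== Notes on version B (the rewrite author's own statement) =====
-- stated objective: simpler
-- what changed: B drops the rotation helper r() and the recursion: for a!=0 it writes the vertical flip directly as the coordinate formula cell (i,j) <- cell (n-1-i,j) of the n x n grid; Pre_ excludes only the inputs where both implementations raise IndexError (a!=0 with some row shorter than len(y)).
import Mathlib
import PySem

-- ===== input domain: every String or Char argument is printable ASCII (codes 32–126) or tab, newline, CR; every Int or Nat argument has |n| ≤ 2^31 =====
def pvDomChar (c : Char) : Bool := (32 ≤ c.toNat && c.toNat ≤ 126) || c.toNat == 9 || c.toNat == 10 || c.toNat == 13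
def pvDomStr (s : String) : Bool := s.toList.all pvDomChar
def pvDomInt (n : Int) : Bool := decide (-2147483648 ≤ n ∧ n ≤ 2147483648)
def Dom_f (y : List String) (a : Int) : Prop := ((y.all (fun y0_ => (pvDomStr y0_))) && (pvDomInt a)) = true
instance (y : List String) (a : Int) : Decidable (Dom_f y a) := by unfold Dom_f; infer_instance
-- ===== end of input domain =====

-- B drops A's rotation helper and recursion: for a≠0 the composition is just reversing the row order (simpler).

-- ===== PORT A =====
-- helper r's comprehension indexes y[~k][j]; where Python would raise IndexError the
-- PySem primitives return none, defaulted here with .getD — Pre_f excludes exactly those inputs.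
def rStep (y : List String) : List String :=
  (PySem.List.pyRange 0 (y.length : Int) 1).map (fun j =>
    String.ofList ((PySem.List.pyRange 0 (y.length : Int) 1).map (fun k =>
      (PySem.Str.pyGet? ((PySem.List.pyGet? y (-(k + 1))).getD "") j).getD ' ')))

def r (y : List String) (c : Int) : List String :=
  (PySem.List.pyRange 0 c 1).foldl (fun z _ => rStep z) y

def f (y : List String) (a : Int) : List String :=
  if a == 0 then
    y.map (fun x => (PySem.Str.slice? x none none (-1)).getD "")
  else
    r (f (r y 1) 0) 3
termination_by (if a == 0 then 0 else 1)
decreasing_by simp_all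

-- ===== PORT B =====
-- Source B indexes y[n-1-i][j]; where Python would raise IndexError the PySem primitives
-- return none, defaulted here with .getD — Pre_f excludes exactly those inputs.
def f_alt (y : List String) (a : Int) : List String :=
  if a == 0 then
    y.map (fun x => (PySem.Str.slice? x none none (-1)).getD "")
  else
    (PySem.List.pyRange 0 (y.length : Int) 1).map (fun i =>
      String.ofList ((PySem.List.pyRange 0 (y.length : Int) 1).map (fun j =>
        (PySem.Str.pyGet? ((PySem.List.pyGet? y ((y.length : Int) - 1 - i)).getD "") j).getD ' ')))

-- ===== PRECONDITION & SPEC =====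
-- Pre_f excludes exactly the inputs where A raises IndexError: a ≠ 0 with some row
-- shorter than len(y) (r's comprehension reads column j < len(y) of every row).
def Pre_f (y : List String) (a : Int) : Prop :=
  a = 0 ∨ ∀ s ∈ y, y.length ≤ s.toList.length
instance (y : List String) (a : Int) : Decidable (Pre_f y a) := by unfold Pre_f; infer_instance

def pvWitness_f : List String × Int := (["abcde", "bcdef"], 1)

def Spec_f (y : List String) (a : Int) (out : List String) : Prop := out = f_alt y a
instance (y : List String) (a : Int) (out : List String) : Decidable (Spec_f y a out) := by unfold Spec_f; infer_instance

-- ===== CLAIM (what is proved, stated in full; the proofs are below) =====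
def Claim_equal_f : Prop := ∀ (y : List String) (a : Int), Dom_f y a → Pre_f y a → Spec_f y a (f y a)

-- ===== LEMMAS AND PROOFS =====

-- character (i,j) of a grid, junk-defaulted out of range (proof-side abstraction)
def gc (y : List String) (i j : ℕ) : Char := ((y.getD i "").toList).getD j ' '

-- an n×n grid built from a character function
def bM (n : ℕ) (g : ℕ → ℕ → Char) : List String :=
  (List.range n).map (fun i => String.ofList ((List.range n).map (fun j => g i j)))

theorem bM_congr (n : ℕ) (g g' : ℕ → ℕ → Char)
    (h : ∀ i j, i < n → j < n → g i j = g' i j) : bM n g = bM n g' := by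
  unfold bM
  apply List.map_congr_left
  intro i hi
  rw [List.mem_range] at hi
  congr 1
  apply List.map_congr_left
  intro j hj
  rw [List.mem_range] at hj
  exact h i j hi hj

theorem length_bM (n : ℕ) (g : ℕ → ℕ → Char) : (bM n g).length = n := by simp [bM]

theorem mem_bM_len (n : ℕ) (g : ℕ → ℕ → Char) (s : String) (hs : s ∈ bM n g) :
    s.toList.length = n := by
  simp only [bM, List.mem_map, List.mem_range] at hs
  obtain ⟨i, _, rfl⟩ := hs
  simp

theorem getD_bM (n : ℕ) (g : ℕ → ℕ → Char) (i : ℕ) (hi : i < n) :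
    (bM n g).getD i "" = String.ofList ((List.range n).map (fun j => g i j)) := by
  rw [List.getD_eq_getElem?_getD]
  simp [bM, hi]

theorem gc_bM (n : ℕ) (g : ℕ → ℕ → Char) (i j : ℕ) (hi : i < n) (hj : j < n) :
    gc (bM n g) i j = g i j := by
  unfold gc
  rw [getD_bM n g i hi]
  rw [List.getD_eq_getElem?_getD]
  simp [hj]

theorem rev_map_range (n : ℕ) (h : ℕ → Char) :
    ((List.range n).map h).reverse = (List.range n).map (fun j => h (n - 1 - j)) := by
  apply List.ext_getElem
  · simp
  · intro i h1 h2
    rw [List.getElem_reverse]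
    simp only [List.getElem_map, List.getElem_range, List.length_map, List.length_range]

-- characterization of one cw rotation on a grid whose rows all reach column len(y)
theorem rStep_sq (y : List String) (h : ∀ s ∈ y, y.length ≤ s.toList.length) :
    rStep y = bM y.length (fun j k => gc y (y.length - 1 - k) j) := by
  unfold rStep bM
  simp only [PySem.List.pyRange_zero_nat, List.map_map]
  apply List.map_congr_left
  intro j hj
  rw [List.mem_range] at hj
  simp only [Function.comp_apply]
  congr 1
  apply List.map_congr_left
  intro k hk
  rw [List.mem_range] at hk
  simp only [Function.comp_apply]
  have hget : PySem.List.pyGet? y (-((k : Int) + 1)) = y[y.length - (k + 1)]? := by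
    have := PySem.List.pyGet?_neg_natCast (xs := y) (k := k + 1) (by omega) (by omega)
    simpa using this
  rw [hget]
  have hlt : y.length - (k + 1) < y.length := by omega
  rw [List.getElem?_eq_getElem hlt]
  have hrow : y.length ≤ (y[y.length - (k + 1)]).toList.length :=
    h _ (List.getElem_mem hlt)
  simp only [Option.getD_some, PySem.Str.pyGet?_natCast]
  rw [List.getElem?_eq_getElem (by omega)]
  unfold gc
  rw [show y.length - 1 - k = y.length - (k + 1) from by omega]
  have hyd : y.getD (y.length - (k + 1)) "" = y[y.length - (k + 1)] := by
    rw [List.getD_eq_getElem?_getD, List.getElem?_eq_getElem hlt]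
    rfl
  rw [hyd, List.getD_eq_getElem?_getD, List.getElem?_eq_getElem (by omega)]

theorem rStep_bM (n : ℕ) (g : ℕ → ℕ → Char) :
    rStep (bM n g) = bM n (fun j k => g (n - 1 - k) j) := by
  rw [rStep_sq (bM n g) (by
    intro s hs
    rw [mem_bM_len n g s hs, length_bM])]
  rw [length_bM]
  apply bM_congr
  intro i j hi hj
  rw [gc_bM n g _ _ (by omega) (by omega)]

-- A's a==0 branch (row reversal) on a built grid
theorem rev_bM (n : ℕ) (g : ℕ → ℕ → Char) :
    (bM n g).map (fun x => (PySem.Str.slice? x none none (-1)).getD "") =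
      bM n (fun i j => g i (n - 1 - j)) := by
  unfold bM
  rw [List.map_map]
  apply List.map_congr_left
  intro i hi
  simp only [Function.comp]
  rw [PySem.Str.slice?_none_none_neg_one]
  simp only [Option.getD_some]
  congr 1
  simp only [String.toList_ofList]
  exact rev_map_range n (g i)

theorem f_zero (y : List String) :
    f y 0 = y.map (fun x => (PySem.Str.slice? x none none (-1)).getD "") := by
  rw [f]
  simp

theorem r_one (y : List String) : r y 1 = rStep y := by
  unfold r
  rw [PySem.List.pyRange_one_cons (by norm_num), PySem.List.pyRange_one_eq_nil (by norm_num)]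
  rfl

theorem r_three (y : List String) : r y 3 = rStep (rStep (rStep y)) := by
  unfold r
  rw [PySem.List.pyRange_one_cons (by norm_num), PySem.List.pyRange_one_cons (by norm_num),
      PySem.List.pyRange_one_cons (by norm_num), PySem.List.pyRange_one_eq_nil (by norm_num)]
  simp only [List.foldl]

-- B's a≠0 branch on a grid whose rows all reach column len(y) is exactly the flipped bM grid
theorem falt_flip (y : List String) (h : ∀ s ∈ y, y.length ≤ s.toList.length) :
    ((PySem.List.pyRange 0 (y.length : Int) 1).map (fun i =>
      String.ofList ((PySem.List.pyRange 0 (y.length : Int) 1).map (fun j =>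
        (PySem.Str.pyGet? ((PySem.List.pyGet? y ((y.length : Int) - 1 - i)).getD "") j).getD ' ')))) =
      bM y.length (fun i j => gc y (y.length - 1 - i) j) := by
  unfold bM
  simp only [PySem.List.pyRange_zero_nat, List.map_map]
  apply List.map_congr_left
  intro i hi
  rw [List.mem_range] at hi
  simp only [Function.comp_apply]
  congr 1
  apply List.map_congr_left
  intro j hj
  rw [List.mem_range] at hj
  simp only [Function.comp_apply]
  have hcast : (y.length : Int) - 1 - (i : Int) = ((y.length - 1 - i : ℕ) : Int) := by
    omega
  have hlt : y.length - 1 - i < y.length := by omega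
  rw [hcast, PySem.List.pyGet?_natCast, List.getElem?_eq_getElem hlt]
  have hrow : y.length ≤ (y[y.length - 1 - i]).toList.length :=
    h _ (List.getElem_mem hlt)
  simp only [Option.getD_some, PySem.Str.pyGet?_natCast]
  rw [List.getElem?_eq_getElem (by omega)]
  unfold gc
  have hyd : y.getD (y.length - 1 - i) "" = y[y.length - 1 - i] := by
    rw [List.getD_eq_getElem?_getD, List.getElem?_eq_getElem hlt]
    rfl
  rw [hyd, List.getD_eq_getElem?_getD, List.getElem?_eq_getElem (by omega)]

-- ===== VERDICT (by name: the statement is the Claim_ definition above) =====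
theorem f_spec : Claim_equal_f := by
  intro y a _ hpre
  unfold Spec_f
  by_cases ha : a = 0
  · subst ha
    rw [f, f_alt]
    simp
  · have hne : (a == 0) = false := by simp [ha]
    rcases hpre with h0 | h
    · exact absurd h0 ha
    rw [f, f_alt]
    simp only [hne, Bool.false_eq_true, if_false]
    rw [r_one, r_three, f_zero]
    rw [rStep_sq y h, rev_bM, rStep_bM, rStep_bM, rStep_bM]
    rw [falt_flip y h]
    apply bM_congr
    intro i j hi hj
    congr 2 <;> omega
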